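-- pv_equiv track=rewrite | github.com/daehyun1023/Algorithm | python/programmers/level3/숫자게임.py | solution
-- ===== SOURCE A (Python) =====
-- def solution(A,B):
--     answer = 0
--     A.sort()
--     B.sort()
--
--     for i in range(len(A)-1, -1, -1):
--         if A[i] >= B[i]: # 젤 큰애들끼리 점수를 비교하고, 점수를 얻지 않는 경우가 생길경우 버리는 카드를 낸다.
--             B.insert(i+1, B[0]) # 버리는 카드 내기
--             B.pop(0)
--
--     for i in range(len(A)):
--         if A[i] < B[i]:
--             answer += 1
--     return answer
-- ===== SOURCE B (Python) =====
-- def solution(A, B):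
--     bs = sorted(B)[:len(A)]  # only the len(A) lowest cards of B are ever played
--     hi = len(bs) - 1
--     wins = 0
--     for a in sorted(A, reverse=True):
--         if hi >= 0 and a < bs[hi]:
--             wins += 1
--             hi -= 1
--     return wins
-- ===== Notes on version B (the rewrite author's own statement) =====
-- stated objective: faster
-- what changed: Replaces A's quadratic rotate-and-recount (repeated B.insert/B.pop list rotations followed by a second indexed comparison pass) by one pass over A in descending sorted order with a single pointer into the len(A) lowest cards of sorted B (the only cards A's loop ever plays), counting a win and moving the pointer down whenever the current top card beats the A card; Pre_ is exactly the inputs where A returns (len(A) <= len(B)).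
-- crash fix: When B is shorter than A, A raises IndexError on the out-of-range B[i] access; B returns the greedy win count using all of B (0 at the witness ([5], [])). — e.g. on solution([5], []): A raises IndexError, B returns 0
import Mathlib
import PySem

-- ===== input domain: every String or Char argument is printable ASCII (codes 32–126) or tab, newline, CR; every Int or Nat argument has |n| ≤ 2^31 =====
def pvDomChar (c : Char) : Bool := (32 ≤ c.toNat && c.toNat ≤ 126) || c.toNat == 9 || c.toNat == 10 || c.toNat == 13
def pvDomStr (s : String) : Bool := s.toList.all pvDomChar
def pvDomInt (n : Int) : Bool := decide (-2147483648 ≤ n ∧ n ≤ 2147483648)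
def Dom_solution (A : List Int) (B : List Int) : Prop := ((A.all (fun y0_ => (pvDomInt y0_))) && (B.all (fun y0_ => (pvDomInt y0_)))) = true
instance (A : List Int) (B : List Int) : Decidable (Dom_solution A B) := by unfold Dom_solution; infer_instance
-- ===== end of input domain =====

-- B replaces A's quadratic rotate-and-recount by one descending pass with a pointer into sorted B (faster).
-- A sorts its arguments in place and rotates B; the equivalence proved here is about the RETURN value only.

-- ===== PORT A =====
-- loop body of A's first for-loop (rotate B's prefix when A[i] >= B[i])
def stepA (As : List Int) (Bcur : List Int) (i : Int) : List Int :=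
  if PySem.List.pyGetD Bcur i 0 ≤ PySem.List.pyGetD As i 0 then
    -- B.insert(i+1, B[0]); B.pop(0)
    match PySem.List.pop? (PySem.List.insert Bcur (i + 1) (PySem.List.pyGetD Bcur 0 0)) 0 with
    | some r => r.2
    | none => PySem.List.insert Bcur (i + 1) (PySem.List.pyGetD Bcur 0 0)
  else Bcur

def solution (A : List Int) (B : List Int) : Int :=
  let As := PySem.List.sorted A (fun x => x)
  let Bs := PySem.List.sorted B (fun x => x)
  let Bf := (PySem.List.pyRange ((As.length : Int) - 1) (-1) (-1)).foldl (stepA As) Bs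
  (PySem.List.pyRange 0 (As.length : Int) 1).foldl
    (fun answer i =>
      if PySem.List.pyGetD As i 0 < PySem.List.pyGetD Bf i 0 then answer + 1 else answer) 0

-- ===== PORT B =====
-- loop body of B: state (hi, wins); count a win and move hi down when bs[hi] beats a
def stepB (bs : List Int) (s : Int × Int) (a : Int) : Int × Int :=
  if 0 ≤ s.1 ∧ a < PySem.List.pyGetD bs s.1 0 then (s.1 - 1, s.2 + 1) else s

def solution_alt (A : List Int) (B : List Int) : Int :=
  let bs := PySem.List.slice (PySem.List.sorted B (fun x => x)) none (some (A.length : Int))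
  ((PySem.List.sorted A (fun x => x) true).foldl (stepB bs) ((bs.length : Int) - 1, 0)).2

-- ===== PRECONDITION & SPEC =====
-- Exactly the inputs on which the Python A returns normally: A raises IndexError when B is shorter than A.
def Pre_solution (A : List Int) (B : List Int) : Prop := A.length ≤ B.length
instance (A : List Int) (B : List Int) : Decidable (Pre_solution A B) := by unfold Pre_solution; infer_instance

def pvWitness_solution : List Int × List Int := ([3, 1, 5, 7], [2, 2, 6, 8])

-- When B is shorter than A, A raises IndexError on the out-of-range B[i] access; B returns the
-- greedy win count using all of B.
def Raises_solution (A : List Int) (B : List Int) : Prop := B.length < A.length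
instance (A : List Int) (B : List Int) : Decidable (Raises_solution A B) := by unfold Raises_solution; infer_instance
def pvRaiseWitness_solution : List Int × List Int := ([5], [])
def pvRaiseWitnessOut_solution : Int := 0

def Spec_solution (A : List Int) (B : List Int) (out : Int) : Prop := out = solution_alt A B
instance (A : List Int) (B : List Int) (out : Int) : Decidable (Spec_solution A B out) := by unfold Spec_solution; infer_instance

-- ===== CLAIM (what is proved, stated in full; the proofs are below) =====
def Claim_equal_solution : Prop := ∀ (A : List Int) (B : List Int), Dom_solution A B → Pre_solution A B → Spec_solution A B (solution A B)
def Claim_raises_solution : Prop := (∀ (A : List Int) (B : List Int), Dom_solution A B → Raises_solution A B → ¬ Pre_solution A B) ∧ (Dom_solution (pvRaiseWitness_solution.1) (pvRaiseWitness_solution.2) ∧ Raises_solution (pvRaiseWitness_solution.1) (pvRaiseWitness_solution.2) ∧ solution_alt (pvRaiseWitness_solution.1) (pvRaiseWitness_solution.2) = pvRaiseWitnessOut_solution)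

-- ===== LEMMAS AND PROOFS =====

-- A's first loop, peeled from the top index: loopA As k B runs the body at i = k-1, ..., 0.
def loopA (As : List Int) : Nat → List Int → List Int
  | 0, Bc => Bc
  | k + 1, Bc => loopA As k (stepA As Bc (k : Int))

-- B's loop as a pure recursion on the remaining (descending) a-values.
def bwins (bs : List Int) : Int → List Int → Int
  | _, [] => 0
  | hi, a :: rest =>
      if 0 ≤ hi ∧ a < PySem.List.pyGetD bs hi 0 then 1 + bwins bs (hi - 1) rest
      else bwins bs hi rest

lemma pyRange_down_cons (m : Int) (hm : 0 ≤ m) :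
    PySem.List.pyRange m (-1) (-1) = m :: PySem.List.pyRange (m - 1) (-1) (-1) := by
  unfold PySem.List.pyRange
  norm_num
  have h1 : (m + 1).toNat = m.toNat + 1 := by omega
  split_ifs with h2 h3 h3
  · rw [h1, List.range_succ_eq_map, List.map_cons, List.map_map]
    norm_num
    intro a _; ring
  · have hm0 : m = 0 := by omega
    subst hm0; norm_num
  · omega
  · omega

lemma foldl_stepA_eq_loopA (As : List Int) (k : Nat) (B : List Int) :
    (PySem.List.pyRange ((k : Int) - 1) (-1) (-1)).foldl (stepA As) B = loopA As k B := by
  induction k generalizing B with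
  | zero => norm_num [loopA]
  | succ k ih =>
      have : ((k : Int) + 1 - 1) = (k : Int) := by ring
      rw [show (((k + 1 : Nat) : Int) - 1) = (k : Int) by push_cast; ring,
        pyRange_down_cons (k : Int) (by positivity)]
      simp only [List.foldl_cons]
      rw [ih]
      rfl


lemma foldl_stepB_eq_bwins (bs : List Int) (l : List Int) (hi c : Int) :
    (l.foldl (stepB bs) (hi, c)).2 = c + bwins bs hi l := by
  induction l generalizing hi c with
  | nil => simp [bwins]
  | cons a rest ih =>
      simp only [List.foldl_cons, stepB, bwins]
      split_ifs with h
      · rw [ih]; ring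
      · rw [ih]


lemma sortedTrue_eq_reverse (xs : List Int) :
    PySem.List.sorted xs (fun x => x) true = (PySem.List.sorted xs (fun x => x)).reverse := by
  have h := PySem.List.eq_of_perm_of_pairwise_le_of_injective (l₁ := (PySem.List.sorted xs (fun x => x) true).reverse)
    (l₂ := PySem.List.sorted xs (fun x => x)) (fun x => x) (fun a b h => h)
    ((List.reverse_perm _).trans ((PySem.List.sorted_perm xs (fun x => x) true).trans (PySem.List.sorted_perm xs (fun x => x) false).symm))
    (by rw [List.pairwise_reverse]; exact PySem.List.sorted_pairwise_rev xs (fun x => x))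
    (PySem.List.sorted_pairwise xs (fun x => x))
  calc PySem.List.sorted xs (fun x => x) true = ((PySem.List.sorted xs (fun x => x) true).reverse).reverse := by rw [List.reverse_reverse]
    _ = (PySem.List.sorted xs (fun x => x)).reverse := by rw [h]

lemma core (As Bs : List Int) (hs : Bs.Pairwise (· ≤ ·)) (n : Nat)
    (hA : As.length = n) (hB : Bs.length = n) :
    ∀ (k lo w : Nat) (F : List Int), lo + w + k = n →
    ∃ P : List Int, loopA As k ((Bs.drop lo).take k ++ F) = P ++ F ∧ P.length = k ∧
      (((List.range k).countP (fun j => decide (As.getD j 0 < P.getD j 0))) : Int)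
        = bwins Bs ((lo : Int) + k - 1) ((As.take k).reverse) := by
  intro k
  induction k with
  | zero =>
      intro lo w F h1
      exact ⟨[], by simp [loopA], rfl, by simp [bwins]⟩
  | succ k ih =>
      intro lo w F h1
      have hlo : lo + k < n := by omega
      have hloB : lo + k < Bs.length := by omega
      have hkA : k < As.length := by omega
      have hWlen : ((Bs.drop lo).take (k+1)).length = k + 1 := by simp; omega
      have hfront : (Bs.drop lo).take (k+1) = Bs[lo]'(by omega) :: (Bs.drop (lo+1)).take k := by
        rw [← List.getElem_cons_drop (as := Bs) (i := lo) (by omega), List.take_succ_cons]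
      have hback : (Bs.drop lo).take (k+1) = (Bs.drop lo).take k ++ [Bs[lo+k]'hloB] := by
        rw [List.take_add_one]
        congr 1
        rw [List.getElem?_drop]
        simp [List.getElem?_eq_getElem (by omega : lo + k < Bs.length)]
      set Bcur := (Bs.drop lo).take (k+1) ++ F with hBcur
      have hlen_take : ((Bs.drop lo).take k).length = k := by simp; omega
      have hget : PySem.List.pyGetD Bcur ((k : Nat) : Int) 0 = Bs[lo+k]'hloB := by
        rw [PySem.List.pyGetD_natCast, hBcur, hback, List.append_assoc,
          List.getD_append_right _ _ _ _ (by omega)]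
        simp [hlen_take]
      have hzero : PySem.List.pyGetD Bcur 0 0 = Bs[lo]'(by omega) := by
        rw [PySem.List.pyGetD_zero, hBcur, hfront]
        simp
      have hmono : Bs[lo]'(by omega) ≤ Bs[lo+k]'hloB := by
        rcases Nat.lt_or_ge 0 k with hk0 | hk0
        · exact List.pairwise_iff_getElem.mp hs lo (lo+k) (by omega) (by omega) (by omega)
        · have hk0' : k = 0 := by omega
          subst hk0'; simp
      have haK : As.getD k 0 = As[k]'hkA := List.getD_eq_getElem _ _ hkA
      have hbsIdx : PySem.List.pyGetD Bs ((lo : Int) + (k : Int)) 0 = Bs[lo+k]'hloB := by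
        rw [show ((lo : Int) + (k : Int)) = (((lo + k : Nat) : Nat) : Int) by push_cast; ring,
          PySem.List.pyGetD_natCast]
        exact List.getD_eq_getElem _ _ hloB
      by_cases hc : Bs[lo+k]'hloB ≤ As.getD k 0
      · -- LOSS branch
        have hstep : stepA As Bcur ((k : Nat) : Int) =
            (Bs.drop (lo+1)).take k ++ (Bs[lo]'(by omega) :: F) := by
          unfold stepA
          rw [hget, PySem.List.pyGetD_natCast, if_pos hc, hzero]
          have hins : PySem.List.insert Bcur (((k : Nat) : Int) + 1) (Bs[lo]'(by omega)) =
              (Bs.drop lo).take (k+1) ++ (Bs[lo]'(by omega) :: F) := by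
            rw [show (((k : Nat) : Int) + 1) = (((k+1 : Nat) : Nat) : Int) by push_cast; ring]
            rw [PySem.List.insert_natCast _ _ _ (by rw [hBcur]; simp; omega)]
            rw [hBcur, List.take_left' hWlen, List.drop_left' hWlen]
          rw [hins, hfront, List.cons_append, PySem.List.pop?_zero_cons]
        rcases ih (lo+1) w (Bs[lo]'(by omega) :: F) (by omega) with ⟨P, hP1, hP2, hP3⟩
        refine ⟨P ++ [Bs[lo]'(by omega)], ?_, by simp [hP2], ?_⟩
        · show loopA As k (stepA As Bcur ((k : Nat) : Int)) = _
          rw [hstep, hP1]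
          simp
        · rw [List.range_succ, List.countP_append]
          have hc' : Bs[lo+k]'hloB ≤ As[k]'hkA := by rw [← haK]; exact hc
          have hx : (P ++ [Bs[lo]'(by omega)]).getD k 0 = Bs[lo]'(by omega) := by
            rw [List.getD_append_right _ _ _ _ (by omega), hP2, Nat.sub_self]; rfl
          have hnot : ¬ (As.getD k 0 < (P ++ [Bs[lo]'(by omega)]).getD k 0) := by
            rw [hx, haK]; omega
          have hcount_k : List.countP (fun j => decide (As.getD j 0 < (P ++ [Bs[lo]'(by omega)]).getD j 0)) [k] = 0 := by
            rw [List.countP_cons, List.countP_nil]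
            simp only [decide_eq_true_eq]
            rw [if_neg hnot]
          have hcount_lt : List.countP (fun j => decide (As.getD j 0 < (P ++ [Bs[lo]'(by omega)]).getD j 0)) (List.range k)
              = List.countP (fun j => decide (As.getD j 0 < P.getD j 0)) (List.range k) := by
            apply List.countP_congr
            intro j hj
            rw [List.getD_append _ _ _ j (by simp at hj; omega)]
          rw [hcount_k, hcount_lt]
          rw [List.take_add_one, List.getElem?_eq_getElem hkA]
          simp only [Option.toList_some, List.reverse_append, List.reverse_cons, List.reverse_nil,
            List.nil_append, List.singleton_append]
          rw [show ((lo : Int) + ((k+1 : Nat) : Int) - 1) = (lo : Int) + (k : Int) by push_cast; ring]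
          show _ = bwins Bs ((lo : Int) + (k : Int)) (As[k]'hkA :: (As.take k).reverse)
          rw [bwins, if_neg]
          · rw [Nat.add_zero, hP3]
            congr 1
            push_cast
            ring
          · rw [hbsIdx]
            rintro ⟨-, hlt⟩
            rw [← haK] at hlt
            omega
      · -- WIN branch
        rw [not_le] at hc
        have hstep : stepA As Bcur ((k : Nat) : Int) = Bcur := by
          unfold stepA
          rw [hget, PySem.List.pyGetD_natCast, if_neg (by omega)]
        rcases ih lo (w+1) (Bs[lo+k]'hloB :: F) (by omega) with ⟨P, hP1, hP2, hP3⟩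
        refine ⟨P ++ [Bs[lo+k]'hloB], ?_, by simp [hP2], ?_⟩
        · show loopA As k (stepA As Bcur ((k : Nat) : Int)) = _
          rw [hstep, hBcur, hback, List.append_assoc, List.singleton_append, hP1]
          simp
        · rw [List.range_succ, List.countP_append]
          have hc' : As[k]'hkA < Bs[lo+k]'hloB := by rw [← haK]; exact hc
          have hx : (P ++ [Bs[lo+k]'hloB]).getD k 0 = Bs[lo+k]'hloB := by
            rw [List.getD_append_right _ _ _ _ (by omega), hP2, Nat.sub_self]; rfl
          have hyes : As.getD k 0 < (P ++ [Bs[lo+k]'hloB]).getD k 0 := by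
            rw [hx, haK]; omega
          have hcount_k : List.countP (fun j => decide (As.getD j 0 < (P ++ [Bs[lo+k]'hloB]).getD j 0)) [k] = 1 := by
            rw [List.countP_cons, List.countP_nil]
            simp only [decide_eq_true_eq]
            rw [if_pos hyes]
          have hcount_lt : List.countP (fun j => decide (As.getD j 0 < (P ++ [Bs[lo+k]'hloB]).getD j 0)) (List.range k)
              = List.countP (fun j => decide (As.getD j 0 < P.getD j 0)) (List.range k) := by
            apply List.countP_congr
            intro j hj
            rw [List.getD_append _ _ _ j (by simp at hj; omega)]
          rw [hcount_k, hcount_lt]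
          rw [List.take_add_one, List.getElem?_eq_getElem hkA]
          simp only [Option.toList_some, List.reverse_append, List.reverse_cons, List.reverse_nil,
            List.nil_append, List.singleton_append]
          rw [show ((lo : Int) + ((k+1 : Nat) : Int) - 1) = (lo : Int) + (k : Int) by push_cast; ring]
          show _ = bwins Bs ((lo : Int) + (k : Int)) (As[k]'hkA :: (As.take k).reverse)
          rw [bwins, if_pos]
          · rw [Nat.cast_add, Nat.cast_one, hP3]
            ring
          · exact ⟨by positivity, by rw [hbsIdx, ← haK]; exact hc⟩

theorem solution_spec_aux (A B : List Int) (hPre : A.length ≤ B.length) :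
    solution A B = solution_alt A B := by
  have hAs : (PySem.List.sorted A (fun x => x)).length = A.length :=
    (PySem.List.sorted_perm A (fun x => x) false).length_eq
  have hSB : (PySem.List.sorted B (fun x => x)).length = B.length :=
    (PySem.List.sorted_perm B (fun x => x) false).length_eq
  set As := PySem.List.sorted A (fun x => x) with hAdef
  set SB := PySem.List.sorted B (fun x => x) with hBdef
  set n := A.length with hn
  set Bs := SB.take n with hBsdef
  have hBsLen : Bs.length = n := by simp [hBsdef]; omega
  have hs : Bs.Pairwise (· ≤ ·) :=
    (PySem.List.sorted_pairwise B (fun x => x)).sublist (List.take_sublist n SB)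
  obtain ⟨P, hP1, hP2, hP3⟩ :=
    core As Bs hs n hAs hBsLen n 0 0 (SB.drop n) (by omega)
  simp only [List.drop_zero] at hP1
  have htake : Bs.take n = Bs := by rw [← hBsLen]; exact List.take_length
  rw [htake, List.take_append_drop] at hP1
  have htakeA : As.take n = As := by rw [← hAs]; exact List.take_length
  rw [htakeA] at hP3
  simp only [solution, solution_alt]
  rw [hAs, foldl_stepA_eq_loopA As n SB, hP1]
  rw [sortedTrue_eq_reverse A, PySem.List.slice_to_natCast, foldl_stepB_eq_bwins]
  rw [PySem.List.pyRange_zero_natCast, List.foldl_map]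
  simp only [PySem.List.pyGetD_natCast]
  have hcnt : ∀ acc : Int, (List.range n).foldl
      (fun acc j => if As.getD j 0 < (P ++ SB.drop n).getD j 0 then acc + 1 else acc) acc
      = (List.range n).foldl
      (fun acc j => if As.getD j 0 < P.getD j 0 then acc + 1 else acc) acc := by
    intro acc
    apply PySem.List.foldl_congr_mem
    intro acc j hj
    rw [List.getD_append _ _ _ j (by simp at hj; omega)]
  rw [hcnt]
  rw [PySem.List.foldl_ite_add_one (p := fun j => As.getD j 0 < P.getD j 0)]
  rw [hP3]
  rw [show (SB.take (A.length)).length = n from by simp [hn]; omega]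
  norm_num
  rfl

-- ===== VERDICT (by name: the statement is the Claim_ definition above) =====
theorem solution_spec : Claim_equal_solution := by
  intro A B _ hPre
  exact solution_spec_aux A B hPre

@[simp] theorem solution_raises : Claim_raises_solution := by
  unfold Claim_raises_solution
  constructor
  · intro A B _ hR hP
    unfold Pre_solution at hP; unfold Raises_solution at hR; omega
  · exact ⟨by decide, by decide, by decide⟩
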